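-- pv_equiv track=rewrite | github.com/sschott20/Competitive-Programming | Educational Codeforces Round 160 (Rated for Div. 2)/D.py | count_reachable_arrays
-- ===== SOURCE A (Python) =====
-- def count_reachable_arrays(n, p, MOD):
--     dp = [0] * (n + 1)
--     dp[0] = 1  # Base case: one way to reach an empty array
--
--     for i in range(1, n + 1):
--         stack = []  # Stack to store pairs (element, dp value)
--         for j in range(i, 0, -1):
--             # Remove elements from the stack that are greater than p[j - 1]
--             while stack and stack[-1][0] > p[j - 1]:
--                 stack.pop()
--             if not stack:
--                 dp[i] = (dp[i] + dp[j - 1]) % MOD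
--             else:
--                 dp[i] = (dp[i] + dp[j - 1] - dp[stack[-1][1]] + MOD) % MOD
--             stack.append((p[j - 1], j - 1))
--
--     return dp[n]
-- ===== SOURCE B (Python) =====
-- def count_reachable_arrays(n, p, MOD):
--     # One left-to-right pass with a single monotonic stack and a maintained
--     # running contribution sum, instead of rebuilding a stack for every i.
--     dp = [1]  # dp[0] = 1
--     cur = 0  # running sum of current contributions of indices 0..i-2
--     stack = []  # indices t with no u in (t, i-1] such that p[u] <= p[t]
--     for i in range(1, n + 1):
--         cur = (cur + dp[i - 1]) % MOD
--         while stack and p[stack[-1]] >= p[i - 1]: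
--             stack.pop()
--             cur = (cur - dp[i - 1]) % MOD
--         stack.append(i - 1)
--         dp.append(cur)
--     return dp[n]
-- ===== Notes on version B (the rewrite author's own statement) =====
-- stated objective: faster
-- what changed: A rebuilds a monotonic stack from scratch for every prefix length i (O(n^2)); B makes one left-to-right pass maintaining a single monotonic stack and a running contribution sum that is corrected by dp[i-1] for each popped index, so each index is pushed and popped at most once.
import Mathlib
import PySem

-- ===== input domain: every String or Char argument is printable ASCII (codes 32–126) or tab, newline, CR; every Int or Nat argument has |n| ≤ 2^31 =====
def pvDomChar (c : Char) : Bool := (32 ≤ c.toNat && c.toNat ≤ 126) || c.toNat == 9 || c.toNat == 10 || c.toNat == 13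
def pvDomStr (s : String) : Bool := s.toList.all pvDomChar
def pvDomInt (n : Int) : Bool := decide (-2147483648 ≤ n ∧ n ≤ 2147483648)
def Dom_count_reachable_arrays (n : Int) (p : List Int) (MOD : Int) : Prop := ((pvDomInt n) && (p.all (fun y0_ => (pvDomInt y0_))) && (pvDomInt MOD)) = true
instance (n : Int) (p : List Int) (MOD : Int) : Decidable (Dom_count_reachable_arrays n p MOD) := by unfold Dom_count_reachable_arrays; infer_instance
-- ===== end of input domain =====

-- B replaces A's per-i rebuilt monotonic stack by ONE left-to-right monotonic stack with a
-- maintained running contribution sum; same return value on every input where Python A returns.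

-- ===== PORT A =====
-- 'while stack and stack[-1][0] > p[j-1]: stack.pop()'
def pvPopA (x : Int) : List (Int × Nat) → List (Int × Nat)
  | [] => []
  | (v, u) :: rest => if x < v then pvPopA x rest else (v, u) :: rest

-- inner 'for j in range(i, 0, -1)' loop; ts = the values j-1 in order i-1, …, 0;
-- dp[i] is only ever read as the running accumulator acc.
def pvInnerA (p : List Int) (MOD : Int) (dp : List Int) : List Nat → Int → List (Int × Nat) → Int
  | [], acc, _ => acc
  | t :: ts, acc, stack =>
    let x := p.getD t 0
    match pvPopA x stack with
    | [] => pvInnerA p MOD dp ts (PySem.Int.mod (acc + dp.getD t 0) MOD) ((x, t) :: [])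
    | (v, u) :: rest =>
        pvInnerA p MOD dp ts (PySem.Int.mod (acc + dp.getD t 0 - dp.getD u 0 + MOD) MOD)
          ((x, t) :: (v, u) :: rest)

def count_reachable_arrays (n : Int) (p : List Int) (MOD : Int) : Int :=
  let m := n.toNat
  let dp0 := (List.replicate (m + 1) 0).set 0 1
  let dp := (List.range' 1 m).foldl
    (fun dp j => dp.set j (pvInnerA p MOD dp ((List.range j).reverse) 0 [])) dp0
  dp.getD m 0

-- ===== PORT B =====
-- 'while stack and p[stack[-1]] >= p[i-1]: stack.pop(); cur = (cur - dp[i-1]) % MOD'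
def pvPopB (p : List Int) (MOD : Int) (x d : Int) : List Nat → Int → List Nat × Int
  | [], cur => ([], cur)
  | t :: rest, cur =>
    if x ≤ p.getD t 0 then pvPopB p MOD x d rest (PySem.Int.mod (cur - d) MOD)
    else (t :: rest, cur)

-- one iteration of B's single loop; w = i-1; state = (dp so far, cur, stack)
def pvStepB (p : List Int) (MOD : Int) (st : List Int × Int × List Nat) (w : Nat) :
    List Int × Int × List Nat :=
  let d := st.1.getD w 0
  let cur1 := PySem.Int.mod (st.2.1 + d) MOD
  let r := pvPopB p MOD (p.getD w 0) d st.2.2 cur1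
  (st.1 ++ [r.2], r.2, w :: r.1)

def count_reachable_arrays_alt (n : Int) (p : List Int) (MOD : Int) : Int :=
  let m := n.toNat
  let st := (List.range m).foldl (pvStepB p MOD) ([1], 0, [])
  st.1.getD m 0

-- ===== PRECONDITION & SPEC =====
-- Pre_ = exactly the inputs on which Python A returns: A raises IndexError for n < 0 or
-- n > len(p), and ZeroDivisionError for MOD = 0 with n ≥ 1 (the '%' in the loop body).
def Pre_count_reachable_arrays (n : Int) (p : List Int) (MOD : Int) : Prop :=
  0 ≤ n ∧ n ≤ (p.length : Int) ∧ (MOD ≠ 0 ∨ n = 0)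
instance (n : Int) (p : List Int) (MOD : Int) : Decidable (Pre_count_reachable_arrays n p MOD) := by
  unfold Pre_count_reachable_arrays; infer_instance
def pvWitness_count_reachable_arrays : Int × List Int × Int := (3, [2, 1, 3], 7)

def Spec_count_reachable_arrays (n : Int) (p : List Int) (MOD : Int) (out : Int) : Prop :=
  out = count_reachable_arrays_alt n p MOD
instance (n : Int) (p : List Int) (MOD : Int) (out : Int) :
    Decidable (Spec_count_reachable_arrays n p MOD out) := by
  unfold Spec_count_reachable_arrays; infer_instance

-- ===== CLAIM (what is proved, stated in full; the proofs are below) =====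
def Claim_equal_count_reachable_arrays : Prop :=
  ∀ (n : Int) (p : List Int) (MOD : Int), Dom_count_reachable_arrays n p MOD →
    Pre_count_reachable_arrays n p MOD →
    Spec_count_reachable_arrays n p MOD (count_reachable_arrays n p MOD)

-- ===== LEMMAS AND PROOFS =====
-- Common specification: pvNb p i t = the nearest u in (t, i) with p[u] ≤ p[t]; pvCtb = the
-- contribution of start index t to dp[i]; pvDpSpec = the dp table both programs compute.
def pvNb (p : List Int) (i t : Nat) : Option Nat :=
  (List.range' (t + 1) (i - (t + 1))).find? (fun u => decide (p.getD u 0 ≤ p.getD t 0))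

def pvCtb (p dp : List Int) (i t : Nat) : Int :=
  dp.getD t 0 - (match pvNb p i t with | some u => dp.getD u 0 | none => 0)

def pvSum (p dp : List Int) (i : Nat) : Int := ((List.range i).map (pvCtb p dp i)).sum

def pvDpSpec (p : List Int) (MOD : Int) : Nat → List Int
  | 0 => [1]
  | i + 1 => pvDpSpec p MOD i ++ [Int.fmod (pvSum p (pvDpSpec p MOD i) (i + 1)) MOD]

lemma pvDpSpec_length (p : List Int) (MOD : Int) (i : Nat) : (pvDpSpec p MOD i).length = i + 1 := by
  induction i with
  | zero => rfl
  | succ i ih => simp [pvDpSpec, ih]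

lemma pvDpSpec_getD_stable (p : List Int) (MOD : Int) (i j t : Nat) (hij : i ≤ j) (ht : t < i + 1) :
    (pvDpSpec p MOD j).getD t 0 = (pvDpSpec p MOD i).getD t 0 := by
  induction j with
  | zero => interval_cases i; rfl
  | succ j ih =>
    rcases Nat.lt_or_ge i (j+1) with h | h
    · have hij' : i ≤ j := by omega
      rw [← ih hij']
      show (pvDpSpec p MOD j ++ _).getD t 0 = _
      rw [List.getD_append]
      rw [pvDpSpec_length]; omega
    · have : i = j + 1 := by omega
      subst this; rfl

lemma pvNb_lt (p : List Int) (i t u : Nat) (h : pvNb p i t = some u) : u < i ∧ t < u := by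
  have hm := List.mem_of_find?_eq_some h
  have := List.mem_range'_1.mp hm
  omega

lemma pvSum_stable (p dp dp' : List Int) (i : Nat)
    (h : ∀ v, v < i → dp.getD v 0 = dp'.getD v 0) : pvSum p dp i = pvSum p dp' i := by
  unfold pvSum
  congr 1
  apply List.map_congr_left
  intro t ht
  have ht' : t < i := List.mem_range.mp ht
  unfold pvCtb
  rw [h t ht']
  cases hnb : pvNb p i t with
  | none => rfl
  | some u =>
    have := pvNb_lt p i t u hnb
    simp only []
    rw [h u (by omega)]

lemma pvPopA_popA (x y : Int) (hxy : x ≤ y) (s : List (Int × Nat)) :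
    pvPopA x (pvPopA y s) = pvPopA x s := by
  induction s with
  | nil => rfl
  | cons h rest ih =>
    obtain ⟨v, u⟩ := h
    by_cases hv : y < v
    · rw [show pvPopA y ((v,u)::rest) = pvPopA y rest from by simp [pvPopA, hv], ih,
        show pvPopA x ((v,u)::rest) = pvPopA x rest from by simp [pvPopA]; omega]
    · rw [show pvPopA y ((v,u)::rest) = (v,u)::rest from by simp [pvPopA, hv]]

def pvCtbM (p dp : List Int) (MOD : Int) (i t : Nat) : Int :=
  match pvNb p i t with
  | some u => dp.getD t 0 - dp.getD u 0 + MOD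
  | none => dp.getD t 0

def pvStkC (p : List Int) (i : Nat) : Nat → List (Int × Nat)
  | 0 => []
  | c + 1 => (p.getD (i - (c + 1)) 0, i - (c + 1)) :: pvPopA (p.getD (i - (c + 1)) 0) (pvStkC p i c)

lemma pvPopA_cons_stay (x v : Int) (u : Nat) (s : List (Int × Nat)) (h : v ≤ x) :
    pvPopA x ((v, u) :: s) = (v, u) :: s := by
  simp [pvPopA, not_lt.mpr h]

lemma pvPopA_cons_pop (x v : Int) (u : Nat) (s : List (Int × Nat)) (h : x < v) :
    pvPopA x ((v, u) :: s) = pvPopA x s := by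
  simp [pvPopA, h]

lemma pvStkC_pop_head (p : List Int) (i : Nat) :
    ∀ c, c ≤ i → ∀ x : Int, (pvPopA x (pvStkC p i c)).head? =
      ((List.range' (i - c) c).find? (fun u => decide (p.getD u 0 ≤ x))).map
        (fun u => (p.getD u 0, u)) := by
  intro c
  induction c with
  | zero => intro _ x; rfl
  | succ c ih =>
    intro hc x
    have ht : i - (c + 1) + 1 = i - c := by omega
    have hrange : List.range' (i - (c+1)) (c+1) = (i - (c+1)) :: List.range' (i - c) c := by
      rw [List.range'_succ, ht]
    rw [hrange]
    set t := i - (c + 1) with hT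
    show (pvPopA x ((p.getD t 0, t) :: pvPopA (p.getD t 0) (pvStkC p i c))).head? = _
    by_cases hx : p.getD t 0 ≤ x
    · rw [pvPopA_cons_stay x _ t _ hx]
      rw [List.find?_cons_of_pos (p := fun u => decide (p.getD u 0 ≤ x)) (by simpa using hx)]
      rfl
    · rw [pvPopA_cons_pop x _ t _ (by omega),
        pvPopA_popA x (p.getD t 0) (by omega), ih (by omega)]
      rw [List.find?_cons_of_neg (p := fun u => decide (p.getD u 0 ≤ x)) (by simpa using hx)]

lemma fmod_absorb (a b MOD : Int) : Int.fmod (Int.fmod a MOD + b) MOD = Int.fmod (a + b) MOD :=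
  Int.fmod_add_fmod a MOD b

lemma pvInnerA_cons_nil (p : List Int) (MOD : Int) (dp : List Int) (t : Nat) (ts : List Nat)
    (acc : Int) (stack : List (Int × Nat)) (h : pvPopA (p.getD t 0) stack = []) :
    pvInnerA p MOD dp (t :: ts) acc stack =
      pvInnerA p MOD dp ts (PySem.Int.mod (acc + dp.getD t 0) MOD) [(p.getD t 0, t)] := by
  simp only [pvInnerA, h]

lemma pvInnerA_cons_cons (p : List Int) (MOD : Int) (dp : List Int) (t : Nat) (ts : List Nat)
    (acc : Int) (stack : List (Int × Nat)) (v : Int) (u : Nat) (rest : List (Int × Nat))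
    (h : pvPopA (p.getD t 0) stack = (v, u) :: rest) :
    pvInnerA p MOD dp (t :: ts) acc stack =
      pvInnerA p MOD dp ts (PySem.Int.mod (acc + dp.getD t 0 - dp.getD u 0 + MOD) MOD)
        ((p.getD t 0, t) :: (v, u) :: rest) := by
  simp only [pvInnerA, h]

lemma pvInnerA_run (p : List Int) (MOD : Int) (dp : List Int) (i : Nat) :
    ∀ k, k ≤ i → ∀ a : Int,
      pvInnerA p MOD dp ((List.range k).reverse) (Int.fmod a MOD) (pvStkC p i (i - k)) =
        Int.fmod (a + ((List.range k).map (pvCtbM p dp MOD i)).sum) MOD := by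
  intro k
  induction k with
  | zero => intro _ a; simp [pvInnerA]
  | succ k ih =>
    intro hk a
    have hrev : (List.range (k+1)).reverse = k :: (List.range k).reverse := by
      simp [List.range_succ]
    rw [hrev]
    have hc : i - (k + 1) ≤ i := by omega
    have hnb : pvNb p i k = (List.range' (i - (i - (k+1))) (i - (k+1))).find?
        (fun u => decide (p.getD u 0 ≤ p.getD k 0)) := by
      unfold pvNb
      congr 2
      omega
    have hhead := pvStkC_pop_head p i (i - (k+1)) hc (p.getD k 0)
    have hstk : (p.getD k 0, k) :: pvPopA (p.getD k 0) (pvStkC p i (i - (k+1))) = pvStkC p i (i - k) := by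
      have h1 : i - k = (i - (k+1)) + 1 := by omega
      rw [h1]
      show _ = (p.getD (i - ((i-(k+1))+1)) 0, i - ((i-(k+1))+1)) :: _
      have h2 : i - ((i-(k+1))+1) = k := by omega
      rw [h2]
    have hsum : ((List.range (k+1)).map (pvCtbM p dp MOD i)).sum
        = pvCtbM p dp MOD i k + ((List.range k).map (pvCtbM p dp MOD i)).sum := by
      simp [List.range_succ]; ring
    show pvInnerA p MOD dp (k :: (List.range k).reverse) (Int.fmod a MOD) (pvStkC p i (i - (k+1))) = _
    cases hpop : pvPopA (p.getD k 0) (pvStkC p i (i - (k+1))) with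
    | nil =>
      have hfind : pvNb p i k = none := by
        rw [hnb, ← Option.map_eq_none_iff (f := fun u => (p.getD u 0, u))]
        rw [← hhead, hpop]
        rfl
      have hctb : pvCtbM p dp MOD i k = dp.getD k 0 := by unfold pvCtbM; rw [hfind]
      rw [pvInnerA_cons_nil p MOD dp k _ _ _ hpop]
      rw [show PySem.Int.mod (Int.fmod a MOD + dp.getD k 0) MOD
          = Int.fmod (a + dp.getD k 0) MOD from fmod_absorb a _ MOD]
      rw [show ((p.getD k 0, k) :: ([] : List (Int × Nat))) = pvStkC p i (i - k) from by
        rw [← hstk, hpop]]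
      rw [ih (by omega), hsum, hctb]
      ring_nf
    | cons hd rest =>
      obtain ⟨v, u⟩ := hd
      have hhead2 : (some (v, u) : Option (Int × Nat)) =
          (pvNb p i k).map (fun u => (p.getD u 0, u)) := by
        rw [hnb, ← hhead, hpop]; rfl
      cases hfind : pvNb p i k with
      | none => rw [hfind] at hhead2; simp at hhead2
      | some u' =>
        rw [hfind] at hhead2
        simp at hhead2
        obtain ⟨hv, hu⟩ := hhead2
        subst hu
        have hctb : pvCtbM p dp MOD i k = dp.getD k 0 - dp.getD u 0 + MOD := by
          unfold pvCtbM; rw [hfind]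
        rw [pvInnerA_cons_cons p MOD dp k _ _ _ v u rest hpop]
        rw [show PySem.Int.mod (Int.fmod a MOD + dp.getD k 0 - dp.getD u 0 + MOD) MOD
            = Int.fmod (a + (dp.getD k 0 - dp.getD u 0 + MOD)) MOD from by
          rw [show Int.fmod a MOD + dp.getD k 0 - dp.getD u 0 + MOD
              = Int.fmod a MOD + (dp.getD k 0 - dp.getD u 0 + MOD) from by ring]
          exact fmod_absorb a _ MOD]
        rw [show ((p.getD k 0, k) :: (v, u) :: rest) = pvStkC p i (i - k) from by
          rw [← hstk, hpop]]
        rw [ih (by omega), hsum, hctb]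
        ring_nf

lemma pvCtbM_sum_split (p dp : List Int) (MOD : Int) (i : Nat) (l : List Nat) :
    (l.map (pvCtbM p dp MOD i)).sum =
      (l.map (pvCtb p dp i)).sum + ((l.countP (fun t => (pvNb p i t).isSome)) : Int) * MOD := by
  induction l with
  | nil => simp
  | cons t ts ih =>
    simp only [List.map_cons, List.sum_cons, ih, List.countP_cons]
    cases hnb : pvNb p i t with
    | none =>
      have h1 : pvCtbM p dp MOD i t = dp.getD t 0 := by unfold pvCtbM; rw [hnb]
      have h2 : pvCtb p dp i t = dp.getD t 0 := by unfold pvCtb; rw [hnb]; simp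
      simp [h1, h2]
      ring
    | some u =>
      have h1 : pvCtbM p dp MOD i t = dp.getD t 0 - dp.getD u 0 + MOD := by
        unfold pvCtbM; rw [hnb]
      have h2 : pvCtb p dp i t = dp.getD t 0 - dp.getD u 0 := by
        unfold pvCtb; rw [hnb]
      simp [h1, h2]
      ring

lemma pvCtbM_sum_fmod (p dp : List Int) (MOD : Int) (i : Nat) (l : List Nat) :
    Int.fmod ((l.map (pvCtbM p dp MOD i)).sum) MOD = Int.fmod ((l.map (pvCtb p dp i)).sum) MOD := by
  rw [pvCtbM_sum_split]
  exact Int.add_mul_fmod_self_right _ _ _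

lemma pvOuterA (p : List Int) (MOD : Int) (m : Nat) :
    ∀ i, i ≤ m →
      (List.range' 1 i).foldl
        (fun dp j => dp.set j (pvInnerA p MOD dp ((List.range j).reverse) 0 []))
        ((List.replicate (m + 1) 0).set 0 1) =
      pvDpSpec p MOD i ++ List.replicate (m - i) 0 := by
  intro i
  induction i with
  | zero =>
    intro _
    show (List.replicate (m + 1) 0).set 0 1 = _
    rw [List.replicate_succ]
    rfl
  | succ i ih =>
    intro hi
    rw [List.range'_1_concat, List.foldl_append, ih (by omega)]
    set old := pvDpSpec p MOD i ++ List.replicate (m - i) 0 with hold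
    show old.set (1 + i) (pvInnerA p MOD old ((List.range (1+i)).reverse) 0 []) = _
    have hlen : (pvDpSpec p MOD i).length = i + 1 := pvDpSpec_length p MOD i
    -- inner value
    have hrun := pvInnerA_run p MOD old (i+1) (i+1) (le_refl _) 0
    rw [Nat.sub_self] at hrun
    have h0 : Int.fmod 0 MOD = 0 := Int.zero_fmod MOD
    rw [h0] at hrun
    have hv : pvInnerA p MOD old ((List.range (i+1)).reverse) 0 [] =
        Int.fmod (((List.range (i+1)).map (pvCtbM p old MOD (i+1))).sum) MOD := by
      show pvInnerA p MOD old ((List.range (i+1)).reverse) 0 (pvStkC p (i+1) 0) = _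
      rw [hrun]
      norm_num
    -- contributions read only indices < i+1 where old = dpSpec
    have hstab : ∀ v, v < i + 1 → old.getD v 0 = (pvDpSpec p MOD i).getD v 0 := by
      intro v hv
      rw [hold, List.getD_append _ _ _ _ (by omega)]
    have hmapeq : ∀ t ∈ List.range (i+1),
        pvCtbM p old MOD (i+1) t = pvCtbM p (pvDpSpec p MOD i) MOD (i+1) t := by
      intro t ht
      have ht' : t < i + 1 := List.mem_range.mp ht
      unfold pvCtbM
      cases hnb : pvNb p (i+1) t with
      | none => simp only []; rw [hstab t ht']
      | some u =>
        have hu := pvNb_lt p (i+1) t u hnb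
        simp only []
        rw [hstab t ht', hstab u (by omega)]
    have hveq : pvInnerA p MOD old ((List.range (1+i)).reverse) 0 [] =
        Int.fmod (pvSum p (pvDpSpec p MOD i) (i+1)) MOD := by
      rw [show 1 + i = i + 1 from by omega, hv, List.map_congr_left hmapeq,
        pvCtbM_sum_fmod]
      rfl
    rw [hveq]
    -- the set
    have hsplit : List.replicate (m - i) (0 : Int) = 0 :: List.replicate (m - (i+1)) 0 := by
      rw [show m - i = (m - (i+1)) + 1 from by omega, List.replicate_succ]
    rw [hold, hsplit, show 1 + i = (pvDpSpec p MOD i).length + 0 from by omega,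
      List.set_append_right _ _ (by omega)]
    simp [pvDpSpec]

def pvSurv (p : List Int) (w : Nat) : List Nat :=
  ((List.range w).filter (fun t => (pvNb p w t).isNone)).reverse

lemma pvNb_succ (p : List Int) (w t : Nat) (ht : t < w) :
    pvNb p (w + 1) t =
      (match pvNb p w t with
       | some u => some u
       | none => if p.getD w 0 ≤ p.getD t 0 then some w else none) := by
  unfold pvNb
  have h1 : w + 1 - (t + 1) = (w - (t+1)) + 1 := by omega
  have h2 : List.range' (t+1) ((w - (t+1)) + 1) = List.range' (t+1) (w - (t+1)) ++ [t + 1 + (w - (t+1))] :=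
    List.range'_1_concat
  have h3 : t + 1 + (w - (t+1)) = w := by omega
  rw [h1, h2, h3, List.find?_append]
  cases hf : (List.range' (t+1) (w - (t+1))).find? (fun u => decide (p.getD u 0 ≤ p.getD t 0)) with
  | some u => rfl
  | none =>
    simp only [Option.none_or]
    by_cases hw : p.getD w 0 ≤ p.getD t 0
    · rw [List.find?_cons_of_pos (p := fun u => decide (p.getD u 0 ≤ p.getD t 0)) (by simpa using hw), if_pos hw]
    · rw [List.find?_cons_of_neg (p := fun u => decide (p.getD u 0 ≤ p.getD t 0)) (by simpa using hw), if_neg hw]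
      rfl

lemma pvNb_none_iff (p : List Int) (w t : Nat) :
    (pvNb p w t) = none ↔ ∀ v, t < v → v < w → p.getD t 0 < p.getD v 0 := by
  unfold pvNb
  rw [List.find?_eq_none]
  constructor
  · intro h v hv1 hv2
    have hm : v ∈ List.range' (t+1) (w - (t+1)) := List.mem_range'_1.mpr (by omega)
    have := h v hm
    simp at this
    exact this
  · intro h u hu
    have := List.mem_range'_1.mp hu
    simp
    exact h u (by omega) (by omega)

lemma pvSurv_pairwise (p : List Int) (w : Nat) :
    (pvSurv p w).Pairwise (fun a b => p.getD b 0 < p.getD a 0) := by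
  unfold pvSurv
  rw [List.pairwise_reverse]
  have hp : ((List.range w).filter (fun t => (pvNb p w t).isNone)).Pairwise (· < ·) :=
    List.Pairwise.sublist List.filter_sublist List.pairwise_lt_range
  refine List.Pairwise.imp_of_mem ?_ hp
  intro a b ha hb hab
  have hb' := List.mem_filter.mp hb
  have ha' := List.mem_filter.mp ha
  have hbw : b < w := List.mem_range.mp hb'.1
  have hanone : pvNb p w a = none := Option.isNone_iff_eq_none.mp (by simpa using ha'.2)
  exact (pvNb_none_iff p w a).mp hanone b hab hbw

lemma pvPopB_cons (p : List Int) (MOD : Int) (x d : Int) (t : Nat) (rest : List Nat) (cur : Int) :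
    pvPopB p MOD x d (t :: rest) cur =
      if x ≤ p.getD t 0 then pvPopB p MOD x d rest (PySem.Int.mod (cur - d) MOD)
      else (t :: rest, cur) := rfl

lemma pvPopB_spec (p : List Int) (MOD : Int) (x d : Int) :
    ∀ (s : List Nat), s.Pairwise (fun a b => p.getD b 0 < p.getD a 0) → ∀ c : Int,
      pvPopB p MOD x d s (Int.fmod c MOD) =
        (s.filter (fun t => decide (p.getD t 0 < x)),
         Int.fmod (c - ((s.countP (fun t => decide (x ≤ p.getD t 0))) : Int) * d) MOD) := by
  intro s
  induction s with
  | nil => intro _ c; simp [pvPopB]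
  | cons t rest ih =>
    intro hpw c
    have hrest := hpw.of_cons
    have hall : ∀ b ∈ rest, p.getD b 0 < p.getD t 0 := fun b hb => (List.pairwise_cons.mp hpw).1 b hb
    by_cases hx : x ≤ p.getD t 0
    · rw [pvPopB_cons, if_pos hx]
      rw [show PySem.Int.mod (Int.fmod c MOD - d) MOD = Int.fmod (c - d) MOD from by
        show Int.fmod (Int.fmod c MOD - d) MOD = _
        rw [show Int.fmod c MOD - d = Int.fmod c MOD + (-d) from by ring,
          Int.fmod_add_fmod, show c + -d = c - d from by ring]]
      rw [ih hrest (c - d)]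
      simp only [Prod.mk.injEq]
      refine ⟨?_, ?_⟩
      · rw [List.filter_cons,
          show (decide (p.getD t 0 < x)) = false from by simpa using not_lt.mpr hx]
        simp
      · rw [List.countP_cons,
          show (decide (x ≤ p.getD t 0)) = true from by simpa using hx]
        congr 1
        simp
        ring
    · rw [pvPopB_cons, if_neg hx]
      have h1 : rest.filter (fun t => decide (p.getD t 0 < x)) = rest := by
        rw [List.filter_eq_self]
        intro b hb
        simp only [decide_eq_true_eq]
        have := hall b hb
        omega
      have h2 : rest.countP (fun t => decide (x ≤ p.getD t 0)) = 0 := by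
        rw [List.countP_eq_zero]
        intro b hb
        simp only [decide_eq_true_eq]
        have := hall b hb
        omega
      rw [List.filter_cons, List.countP_cons]
      have hxlt : p.getD t 0 < x := by omega
      have hd1 : (decide (p.getD t 0 < x)) = true := by simpa using hxlt
      have hd2 : (decide (x ≤ p.getD t 0)) = false := by simpa using hx
      rw [hd1, hd2, h1, h2]
      norm_num

lemma pvSurv_succ (p : List Int) (w : Nat) :
    pvSurv p (w + 1) = w :: (pvSurv p w).filter (fun t => decide (p.getD t 0 < p.getD w 0)) := by
  unfold pvSurv
  rw [List.range_succ, List.filter_append, List.reverse_append]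
  have hw : (pvNb p (w+1) w).isNone = true := by
    unfold pvNb
    simp
  rw [show List.filter (fun t => (pvNb p (w+1) t).isNone) [w] = [w] from by simp [hw]]
  have hfil : (List.range w).filter (fun t => (pvNb p (w+1) t).isNone) =
      ((List.range w).filter (fun t => (pvNb p w t).isNone)).filter
        (fun t => decide (p.getD t 0 < p.getD w 0)) := by
    rw [List.filter_filter]
    apply List.filter_congr
    intro t ht
    have htw : t < w := List.mem_range.mp ht
    rw [pvNb_succ p w t htw]
    cases hnb : pvNb p w t with
    | some u => simp
    | none =>
      by_cases hle : p.getD w 0 ≤ p.getD t 0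
      · rw [if_pos hle, show (decide (p.getD t 0 < p.getD w 0)) = false from by
          simpa using not_lt.mpr hle]
        rfl
      · rw [if_neg hle, show (decide (p.getD t 0 < p.getD w 0)) = true from by
          simpa using not_le.mp hle]
        rfl
  rw [hfil, ← List.filter_reverse]
  rfl

lemma pvSurv_countP (p : List Int) (w : Nat) (x : Int) :
    (pvSurv p w).countP (fun t => decide (x ≤ p.getD t 0)) =
      (List.range w).countP (fun t => (pvNb p w t).isNone && decide (x ≤ p.getD t 0)) := by
  unfold pvSurv
  rw [List.countP_reverse, List.countP_filter]
  apply List.countP_congr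
  intro t _
  rw [Bool.and_comm]

lemma pvSum_succ (p dp : List Int) (w : Nat) :
    pvSum p dp (w + 1) =
      pvSum p dp w + dp.getD w 0 -
        (((List.range w).countP
            (fun t => (pvNb p w t).isNone && decide (p.getD w 0 ≤ p.getD t 0))) : Int) *
          dp.getD w 0 := by
  have key : ∀ l : List Nat, (∀ t ∈ l, t < w) →
      (l.map (pvCtb p dp (w+1))).sum =
        (l.map (pvCtb p dp w)).sum -
          ((l.countP (fun t => (pvNb p w t).isNone && decide (p.getD w 0 ≤ p.getD t 0))) : Int) *
            dp.getD w 0 := by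
    intro l
    induction l with
    | nil => simp
    | cons t ts ih =>
      intro hmem
      have htw : t < w := hmem t (List.mem_cons_self)
      simp only [List.map_cons, List.sum_cons, List.countP_cons, ih (fun a ha => hmem a (List.mem_cons_of_mem _ ha))]
      have hstep : pvCtb p dp (w+1) t =
          pvCtb p dp w t -
            (if ((pvNb p w t).isNone && decide (p.getD w 0 ≤ p.getD t 0)) = true
             then dp.getD w 0 else 0) := by
        unfold pvCtb
        rw [pvNb_succ p w t htw]
        cases hnb : pvNb p w t with
        | some u => simp
        | none =>
          by_cases hle : p.getD w 0 ≤ p.getD t 0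
          · rw [if_pos hle,
              show ((none : Option Nat).isNone && decide (p.getD w 0 ≤ p.getD t 0)) = true from by
                rw [show (decide (p.getD w 0 ≤ p.getD t 0)) = true from by simpa using hle]; rfl]
            simp
          · rw [if_neg hle,
              show ((none : Option Nat).isNone && decide (p.getD w 0 ≤ p.getD t 0)) = false from by
                rw [show (decide (p.getD w 0 ≤ p.getD t 0)) = false from by simpa using hle]; rfl]
            simp
      rw [hstep]
      by_cases hb : ((pvNb p w t).isNone && decide (p.getD w 0 ≤ p.getD t 0)) = true
      · rw [if_pos hb, if_pos hb]
        push_cast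
        ring
      · rw [if_neg hb, if_neg hb]
        push_cast
        ring
  unfold pvSum
  rw [List.range_succ, List.map_append, List.sum_append]
  have hlast : pvCtb p dp (w+1) w = dp.getD w 0 := by
    unfold pvCtb
    rw [show pvNb p (w+1) w = none from by unfold pvNb; simp]
    simp
  have hmain := key (List.range w) (fun t ht => List.mem_range.mp ht)
  simp only [List.map_cons, List.map_nil, List.sum_cons, List.sum_nil, hlast]
  rw [hmain]
  ring

lemma pvOuterB (p : List Int) (MOD : Int) :
    ∀ w, (List.range w).foldl (pvStepB p MOD) ([1], 0, []) =
      (pvDpSpec p MOD w, Int.fmod (pvSum p (pvDpSpec p MOD w) w) MOD, pvSurv p w) := by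
  intro w
  induction w with
  | zero =>
    show ([1], (0 : Int), ([] : List Nat)) = _
    rw [show pvSum p (pvDpSpec p MOD 0) 0 = 0 from rfl, Int.zero_fmod]
    rfl
  | succ w ih =>
    rw [List.range_succ, List.foldl_append, ih]
    show pvStepB p MOD _ w = _
    unfold pvStepB
    set d := (pvDpSpec p MOD w).getD w 0 with hd
    have hcur1 : PySem.Int.mod (Int.fmod (pvSum p (pvDpSpec p MOD w) w) MOD + d) MOD
        = Int.fmod (pvSum p (pvDpSpec p MOD w) w + d) MOD := by
      show Int.fmod _ _ = _
      rw [Int.fmod_add_fmod]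
    simp only [hcur1]
    rw [pvPopB_spec p MOD (p.getD w 0) d (pvSurv p w) (pvSurv_pairwise p w)
      (pvSum p (pvDpSpec p MOD w) w + d)]
    simp only []
    have hsum : pvSum p (pvDpSpec p MOD w) w + d -
        (((pvSurv p w).countP (fun t => decide (p.getD w 0 ≤ p.getD t 0))) : Int) * d
        = pvSum p (pvDpSpec p MOD w) (w + 1) := by
      rw [pvSurv_countP, pvSum_succ]
    have hval : Int.fmod (pvSum p (pvDpSpec p MOD w) w + d -
        (((pvSurv p w).countP (fun t => decide (p.getD w 0 ≤ p.getD t 0))) : Int) * d) MOD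
        = Int.fmod (pvSum p (pvDpSpec p MOD w) (w + 1)) MOD := by rw [hsum]
    rw [hval]
    have hdp : pvDpSpec p MOD w ++ [Int.fmod (pvSum p (pvDpSpec p MOD w) (w + 1)) MOD]
        = pvDpSpec p MOD (w + 1) := rfl
    have hstab : pvSum p (pvDpSpec p MOD w) (w + 1) = pvSum p (pvDpSpec p MOD (w+1)) (w + 1) := by
      apply pvSum_stable
      intro v hv
      exact (pvDpSpec_getD_stable p MOD w (w+1) v (by omega) (by omega)).symm
    rw [hdp, ← pvSurv_succ, hstab]

-- ---- tying both ports to the common dp sequence ----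
lemma countA_eq (n : Int) (p : List Int) (MOD : Int) :
    count_reachable_arrays n p MOD = (pvDpSpec p MOD n.toNat).getD n.toNat 0 := by
  show ((List.range' 1 n.toNat).foldl
      (fun dp j => dp.set j (pvInnerA p MOD dp ((List.range j).reverse) 0 []))
      ((List.replicate (n.toNat + 1) 0).set 0 1)).getD n.toNat 0 = _
  rw [pvOuterA p MOD n.toNat n.toNat (le_refl _), Nat.sub_self]
  simp

lemma countB_eq (n : Int) (p : List Int) (MOD : Int) :
    count_reachable_arrays_alt n p MOD = (pvDpSpec p MOD n.toNat).getD n.toNat 0 := by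
  show (((List.range n.toNat).foldl (pvStepB p MOD) ([1], 0, [])).1).getD n.toNat 0 = _
  rw [pvOuterB p MOD n.toNat]

-- ===== VERDICT (by name: the statement is the Claim_ definition above) =====
theorem count_reachable_arrays_spec : Claim_equal_count_reachable_arrays := by
  intro n p MOD _ _
  unfold Spec_count_reachable_arrays
  rw [countA_eq, countB_eq]
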